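-- pv_equiv track=rewrite | github.com/Dhyanvj/Programming-Exercise | progex-2-1 (1).py | FirstEvenOdd
-- ===== SOURCE A (Python) =====
-- def FirstEvenOdd (numberList) :
--     even = 999
--     odd = 100
--     for i in numberList :
--         if i % 2 == 0 :
--             even = i
--             break
--     for i in numberList :
--         if i % 2 != 0 :
--             odd = i
--             break
--     return [even,odd]
--     # Returns a two element list, firstNums, containing the first even number
--     # in numberList followed by the first odd number in numberList.
--     # If numberList contains no even numbers the first element of firstNums
--     # should be 999.
--     # If numberList contains no odd numbers the second element of firstNums
--     # should be 100.
--
--     return [999,100]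
-- ===== SOURCE B (Python) =====
-- def FirstEvenOdd(numberList):
--     # Single combined traversal maintaining two Optional slots; stops as soon
--     # as both the first even and the first odd element have been seen.
--     even = None
--     odd = None
--     for i in numberList:
--         if even is None and i % 2 == 0:
--             even = i
--         if odd is None and i % 2 != 0:
--             odd = i
--         if even is not None and odd is not None:
--             break
--     return [999 if even is None else even, 100 if odd is None else odd]
-- ===== Notes on version B (the rewrite author's own statement) =====
-- stated objective: simpler
-- what changed: Replaced A's two independent early-breaking scans of the list by one combined traversal that carries two Optional slots (first even, first odd) and stops as soon as both are filled.
import Mathlib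
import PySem

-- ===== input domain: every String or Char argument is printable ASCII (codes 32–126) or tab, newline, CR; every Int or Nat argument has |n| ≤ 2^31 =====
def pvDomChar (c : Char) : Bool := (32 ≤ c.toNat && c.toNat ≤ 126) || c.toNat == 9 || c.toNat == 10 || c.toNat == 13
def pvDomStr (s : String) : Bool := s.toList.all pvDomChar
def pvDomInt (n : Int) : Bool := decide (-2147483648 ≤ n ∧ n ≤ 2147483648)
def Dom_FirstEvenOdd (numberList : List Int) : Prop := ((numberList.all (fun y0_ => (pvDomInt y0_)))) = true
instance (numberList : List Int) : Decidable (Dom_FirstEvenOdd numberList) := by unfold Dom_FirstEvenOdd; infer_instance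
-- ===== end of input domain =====

-- B replaces A's two early-breaking scans by one combined traversal with two Optional slots (objective: simpler).

-- ===== PORT A =====
-- A's first loop: scan for the first i with i % 2 == 0, else keep the initial 999.
def pvA_firstEven : List Int → Int
  | [] => 999
  | i :: t => if PySem.Int.mod i 2 == 0 then i else pvA_firstEven t

-- A's second loop: scan for the first i with i % 2 != 0, else keep the initial 100.
def pvA_firstOdd : List Int → Int
  | [] => 100
  | i :: t => if PySem.Int.mod i 2 != 0 then i else pvA_firstOdd t

def FirstEvenOdd (numberList : List Int) : List Int :=
  [pvA_firstEven numberList, pvA_firstOdd numberList]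

-- ===== PORT B =====
-- B's single loop, state = the two Optional slots; early break when both are filled.
def pvB_go : List Int → Option Int → Option Int → List Int
  | [], even, odd => [even.getD 999, odd.getD 100]
  | i :: t, even, odd =>
    let even' := if even.isNone && (PySem.Int.mod i 2 == 0) then some i else even
    let odd'  := if odd.isNone && (PySem.Int.mod i 2 != 0) then some i else odd
    if even'.isSome && odd'.isSome then [even'.getD 999, odd'.getD 100]
    else pvB_go t even' odd'

def FirstEvenOdd_alt (numberList : List Int) : List Int :=
  pvB_go numberList none none

-- ===== PRECONDITION & SPEC =====
def Spec_FirstEvenOdd (numberList : List Int) (out : List Int) : Prop := out = FirstEvenOdd_alt numberList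
instance (numberList : List Int) (out : List Int) : Decidable (Spec_FirstEvenOdd numberList out) := by unfold Spec_FirstEvenOdd; infer_instance

-- ===== CLAIM (what is proved, stated in full; the proofs are below) =====
def Claim_equal_FirstEvenOdd : Prop := ∀ (numberList : List Int), Dom_FirstEvenOdd numberList → Spec_FirstEvenOdd numberList (FirstEvenOdd numberList)

-- ===== LEMMAS AND PROOFS =====
-- Invariant: a filled slot is returned unchanged; an empty slot receives the scan result.
theorem pvB_go_eq (l : List Int) : ∀ (e o : Option Int),
    pvB_go l e o = [e.getD (pvA_firstEven l), o.getD (pvA_firstOdd l)] := by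
  induction l with
  | nil => intro e o; simp [pvB_go, pvA_firstEven, pvA_firstOdd]
  | cons i t ih =>
    intro e o
    simp only [pvB_go, pvA_firstEven, pvA_firstOdd]
    cases e <;> cases o <;>
      by_cases h : PySem.Int.mod i 2 == 0 <;>
      simp [h, ih] <;> (try split_ifs) <;> first | rfl | omega

-- ===== VERDICT (by name: the statement is the Claim_ definition above) =====
theorem FirstEvenOdd_spec : Claim_equal_FirstEvenOdd := by
  intro l _
  unfold Spec_FirstEvenOdd FirstEvenOdd FirstEvenOdd_alt
  rw [pvB_go_eq]
  simp
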